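-- pv_equiv track=rewrite | github.com/HamiGames/Lucid | infrastructure/containers/inject_dockerfile_x_files_skeleton.py | _replace_last_two_path_tokens
-- ===== SOURCE A (Python) =====
-- def _replace_last_two_path_tokens(parts: list[str], new_src: str, new_dst: str) -> list[str] | None:
--     indices = [i for i, p in enumerate(parts) if not p.startswith("--")]
--     if len(indices) < 2:
--         return None
--     i_src, i_dst = indices[-2], indices[-1]
--     out = list(parts)
--     out[i_src] = new_src
--     out[i_dst] = new_dst
--     return out
-- ===== SOURCE B (Python) =====
-- def _replace_last_two_path_tokens(parts: list[str], new_src: str, new_dst: str) -> list[str] | None: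
--     def go(rev, repl):
--         # rebuild the reversed list, consuming one replacement per non-flag token
--         if not repl:
--             return rev
--         if not rev:
--             return None
--         head, tail = rev[0], rev[1:]
--         if head.startswith("--"):
--             rest = go(tail, repl)
--         else:
--             rest = go(tail, repl[1:])
--             head = repl[0]
--         return None if rest is None else [head] + rest
--
--     res = go(parts[::-1], [new_dst, new_src])
--     return None if res is None else res[::-1]
-- ===== Notes on version B (the rewrite author's own statement) =====
-- stated objective: alternative
-- what changed: B computes no indices at all: it recursively rebuilds the reversed list, consuming a replacement list [new_dst, new_src] one element per non-flag token met, and reverses the result, instead of enumerating all non-flag indices and mutating a copy at the last two.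
import Mathlib
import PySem

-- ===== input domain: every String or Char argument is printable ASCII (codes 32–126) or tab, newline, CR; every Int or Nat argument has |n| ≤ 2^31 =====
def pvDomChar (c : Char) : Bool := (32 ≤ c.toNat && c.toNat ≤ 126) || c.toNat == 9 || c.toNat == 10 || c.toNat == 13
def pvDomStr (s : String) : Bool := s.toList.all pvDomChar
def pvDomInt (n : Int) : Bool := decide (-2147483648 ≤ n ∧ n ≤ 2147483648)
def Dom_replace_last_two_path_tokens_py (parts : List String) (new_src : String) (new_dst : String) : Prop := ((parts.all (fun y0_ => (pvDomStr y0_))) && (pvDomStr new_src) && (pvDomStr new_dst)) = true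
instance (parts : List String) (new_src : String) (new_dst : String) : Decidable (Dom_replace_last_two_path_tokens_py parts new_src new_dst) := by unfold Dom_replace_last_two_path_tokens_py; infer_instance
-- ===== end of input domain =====

-- B is a different decomposition: it computes no indices at all — a recursion over the reversed
-- list that substitutes the replacement list [new_dst, new_src] into the first non-flag tokens met.

-- ===== PORT A =====
def replace_last_two_path_tokens_py (parts : List String) (new_src : String) (new_dst : String) : Option (List String) :=
  let indices := ((PySem.List.enumerate parts 0).filter
      (fun ip => !(PySem.Str.startswith ip.2 "--"))).map (·.1)
  if indices.length < 2 then none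
  else
    -- indices[-2] / indices[-1] cannot raise here (length ≥ 2), so pyGetD is exact
    let i_src := PySem.List.pyGetD indices (-2) 0
    let i_dst := PySem.List.pyGetD indices (-1) 0
    some (PySem.List.pySetD (PySem.List.pySetD parts i_src new_src) i_dst new_dst)

-- ===== PORT B =====
-- Source B's inner 'go': rebuild the reversed list, consuming one replacement per non-flag token
def rltGo (rev : List String) (repl : List String) : Option (List String) :=
  match repl, rev with
  | [], _ => some rev
  | _ :: _, [] => none
  | r :: rs, h :: t =>
    if PySem.Str.startswith h "--" then (rltGo t (r :: rs)).map (h :: ·)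
    else (rltGo t rs).map (r :: ·)

def replace_last_two_path_tokens_py_alt (parts : List String) (new_src : String) (new_dst : String) : Option (List String) :=
  match PySem.List.slice? parts none none (-1) with          -- parts[::-1]
  | none => none                                             -- unreachable (step ≠ 0)
  | some rev =>
    match rltGo rev [new_dst, new_src] with
    | none => none
    | some res => PySem.List.slice? res none none (-1)       -- res[::-1]

-- ===== PRECONDITION & SPEC =====
def Spec_replace_last_two_path_tokens_py (parts : List String) (new_src : String) (new_dst : String) (out : Option (List String)) : Prop := out = replace_last_two_path_tokens_py_alt parts new_src new_dst
instance (parts : List String) (new_src : String) (new_dst : String) (out : Option (List String)) : Decidable (Spec_replace_last_two_path_tokens_py parts new_src new_dst out) := by unfold Spec_replace_last_two_path_tokens_py; infer_instance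

-- ===== CLAIM (what is proved, stated in full; the proofs are below) =====
def Claim_equal_replace_last_two_path_tokens_py : Prop := ∀ (parts : List String) (new_src : String) (new_dst : String), Dom_replace_last_two_path_tokens_py parts new_src new_dst → Spec_replace_last_two_path_tokens_py parts new_src new_dst (replace_last_two_path_tokens_py parts new_src new_dst)

-- ===== LEMMAS AND PROOFS =====

-- A's list of non-flag indices, as a named function (proof helper)
def idxE (parts : List String) : List Int :=
  ((PySem.List.enumerate parts 0).filter (fun ip => !(PySem.Str.startswith ip.2 "--"))).map (·.1)

-- the single-replacement analogue of A (replace the LAST non-flag token with s)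
def a1 (parts : List String) (s : String) : Option (List String) :=
  if idxE parts = [] then none
  else some (PySem.List.pySetD parts (PySem.List.pyGetD (idxE parts) (-1) 0) s)

theorem A_def (parts : List String) (s d : String) :
    replace_last_two_path_tokens_py parts s d =
      if (idxE parts).length < 2 then none
      else some (PySem.List.pySetD
        (PySem.List.pySetD parts (PySem.List.pyGetD (idxE parts) (-2) 0) s)
        (PySem.List.pyGetD (idxE parts) (-1) 0) d) := rfl

theorem mem_idxE {t : List String} {i : Int} (h : i ∈ idxE t) : 0 ≤ i ∧ i < t.length := by
  unfold idxE at h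
  rcases List.mem_map.1 h with ⟨ip, hip, rfl⟩
  rcases (PySem.List.mem_enumerate_iff _ _ _).1 (List.mem_of_mem_filter hip) with ⟨k, hk, rfl⟩
  simp
  omega

theorem idxE_append (t : List String) (x : String) :
    idxE (t ++ [x]) = if PySem.Str.startswith x "--" then idxE t
      else idxE t ++ [(t.length : Int)] := by
  unfold idxE
  rw [PySem.List.enumerate_append, List.filter_append, List.map_append]
  by_cases h : PySem.Chars.startswith x.toList ['-', '-'] <;>
    simp [PySem.List.enumerate, h]

-- indices[-2] on an appended singleton is indices[-1] of the prefix
theorem getD_neg2_append (l : List Int) (a : Int) (h : l ≠ []) :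
    PySem.List.pyGetD (l ++ [a]) (-2) 0 = PySem.List.pyGetD l (-1) 0 := by
  have hp : 0 < l.length := List.length_pos_iff.mpr h
  rw [PySem.List.pyGetD_neg_ofNat _ 2 0 (by omega) (by simp; omega)]
  rw [PySem.List.pyGetD_neg_one l 0 h]
  have h2 : (l ++ [a]).length - 2 < l.length := by simp; omega
  rw [List.getElem_append_left h2]
  have he : (l ++ [a]).length - 2 = l.length - 1 := by simp
  simp only [he]
  exact (List.getLast_eq_getElem h).symm

-- replacing inside the prefix commutes with appending a token
theorem pySetD_append_left (t : List String) (x v : String) {i : Int}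
    (h0 : 0 ≤ i) (h1 : i < t.length) :
    PySem.List.pySetD (t ++ [x]) i v = PySem.List.pySetD t i v ++ [x] := by
  rw [PySem.List.pySetD_of_nonneg _ _ h0, PySem.List.pySetD_of_nonneg _ _ h0,
    List.set_append_left _ _ (by omega)]

-- replacing AT the appended position rewrites the appended token
theorem pySetD_append_self (t : List String) (x v : String) :
    PySem.List.pySetD (t ++ [x]) (t.length : Int) v = t ++ [v] := by
  rw [PySem.List.pySetD_natCast, List.set_append_right _ _ (le_refl _)]
  simp

theorem getD_neg_one_mem (l : List Int) (h : l ≠ []) :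
    PySem.List.pyGetD l (-1) 0 ∈ l := by
  rw [PySem.List.pyGetD_neg_one l 0 h]
  exact List.getLast_mem h

-- B's recursion with a single replacement computes A's single-replacement analogue
theorem a1_eq (t : List String) (s : String) :
    a1 t s = (rltGo t.reverse [s]).map List.reverse := by
  induction t using List.reverseRecOn with
  | nil => rfl
  | append_singleton t x ih =>
    rw [List.reverse_append, show ([x] : List String).reverse ++ t.reverse = x :: t.reverse by simp]
    by_cases hx : PySem.Str.startswith x "--"
    · have hidx : idxE (t ++ [x]) = idxE t := by rw [idxE_append, if_pos hx]
      have hgo : rltGo (x :: t.reverse) [s] = (rltGo t.reverse [s]).map (x :: ·) := by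
        simp only [rltGo]
        rw [if_pos hx]
      rw [hgo]
      unfold a1
      rw [hidx]
      by_cases he : idxE t = []
      · have hnone : rltGo t.reverse [s] = none := by
          unfold a1 at ih
          rw [if_pos he] at ih
          exact Option.map_eq_none_iff.mp ih.symm
        rw [if_pos he, hnone]
        rfl
      · rw [if_neg he]
        unfold a1 at ih
        rw [if_neg he] at ih
        obtain ⟨h0, h1⟩ := mem_idxE (getD_neg_one_mem (idxE t) he)
        rcases hrg : rltGo t.reverse [s] with _ | r
        · rw [hrg] at ih; exact absurd ih (by simp)
        · rw [hrg] at ih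
          have hr : r.reverse = PySem.List.pySetD t (PySem.List.pyGetD (idxE t) (-1) 0) s := by
            simpa using ih.symm
          rw [pySetD_append_left t x s h0 h1]
          simp [hr]
    · have hidx : idxE (t ++ [x]) = idxE t ++ [(t.length : Int)] := by
        rw [idxE_append, if_neg hx]
      have hgo : rltGo (x :: t.reverse) [s] = some (s :: t.reverse) := by
        simp only [rltGo]
        rw [if_neg hx]
        rfl
      rw [hgo]
      unfold a1
      rw [hidx, if_neg (by simp), PySem.List.pyGetD_neg_one_append_singleton,
        pySetD_append_self]
      simp

-- A equals B's recursion on the reversed list with replacements [d, s]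
theorem main_eq (parts : List String) (s d : String) :
    replace_last_two_path_tokens_py parts s d =
      (rltGo parts.reverse [d, s]).map List.reverse := by
  induction parts using List.reverseRecOn with
  | nil => rfl
  | append_singleton t x ih =>
    rw [List.reverse_append, show ([x] : List String).reverse ++ t.reverse = x :: t.reverse by simp]
    by_cases hx : PySem.Str.startswith x "--"
    · have hidx : idxE (t ++ [x]) = idxE t := by rw [idxE_append, if_pos hx]
      have hgo : rltGo (x :: t.reverse) [d, s] = (rltGo t.reverse [d, s]).map (x :: ·) := by
        simp only [rltGo]
        rw [if_pos hx]
      rw [hgo, A_def, hidx]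
      by_cases hlen : (idxE t).length < 2
      · have hnone : rltGo t.reverse [d, s] = none := by
          rw [A_def, if_pos hlen] at ih
          exact Option.map_eq_none_iff.mp ih.symm
        rw [if_pos hlen, hnone]
        rfl
      · rw [if_neg hlen]
        rw [A_def, if_neg hlen] at ih
        have hne : idxE t ≠ [] := by
          intro hc; rw [hc] at hlen; simp at hlen
        have hm1 := mem_idxE (getD_neg_one_mem (idxE t) hne)
        have hm2 : 0 ≤ PySem.List.pyGetD (idxE t) (-2) 0 ∧
            PySem.List.pyGetD (idxE t) (-2) 0 < (t.length : Int) := by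
          have hg : PySem.List.pyGetD (idxE t) (-2) 0 = (idxE t)[(idxE t).length - 2] :=
            PySem.List.pyGetD_neg_ofNat _ 2 0 (by omega) (by omega)
          exact mem_idxE (hg ▸ List.getElem_mem _)
        rcases hrg : rltGo t.reverse [d, s] with _ | r
        · rw [hrg] at ih; exact absurd ih (by simp)
        · rw [hrg] at ih
          have hr : r.reverse = PySem.List.pySetD
              (PySem.List.pySetD t (PySem.List.pyGetD (idxE t) (-2) 0) s)
              (PySem.List.pyGetD (idxE t) (-1) 0) d := by
            simpa using ih.symm
          rw [pySetD_append_left t x s hm2.1 hm2.2]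
          have hlen2 : PySem.List.pyGetD (idxE t) (-1) 0 <
              ((PySem.List.pySetD t (PySem.List.pyGetD (idxE t) (-2) 0) s).length : Int) := by
            rw [PySem.List.pySetD_of_nonneg _ _ hm2.1]
            simpa using hm1.2
          rw [pySetD_append_left _ x d hm1.1 hlen2]
          simp [hr]
    · have hidx : idxE (t ++ [x]) = idxE t ++ [(t.length : Int)] := by
        rw [idxE_append, if_neg hx]
      have hgo : rltGo (x :: t.reverse) [d, s] = (rltGo t.reverse [s]).map (d :: ·) := by
        simp only [rltGo]
        rw [if_neg hx]
      rw [hgo, A_def, hidx]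
      by_cases he : idxE t = []
      · have hnone : rltGo t.reverse [s] = none := by
          have h1 := a1_eq t s
          unfold a1 at h1
          rw [if_pos he] at h1
          exact Option.map_eq_none_iff.mp h1.symm
        rw [if_pos (by simp [he]), hnone]
        rfl
      · have hp : 0 < (idxE t).length := List.length_pos_iff.mpr he
        rw [if_neg (by simp; omega), PySem.List.pyGetD_neg_one_append_singleton,
          getD_neg2_append _ _ he]
        obtain ⟨h0, h1⟩ := mem_idxE (getD_neg_one_mem (idxE t) he)
        have ha1 := a1_eq t s
        unfold a1 at ha1
        rw [if_neg he] at ha1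
        rcases hrg : rltGo t.reverse [s] with _ | r
        · rw [hrg] at ha1; exact absurd ha1 (by simp)
        · rw [hrg] at ha1
          have hr : r.reverse = PySem.List.pySetD t (PySem.List.pyGetD (idxE t) (-1) 0) s := by
            simpa using ha1.symm
          rw [pySetD_append_left t x s h0 h1]
          have hlen2 : (PySem.List.pySetD t (PySem.List.pyGetD (idxE t) (-1) 0) s).length
              = t.length := by
            rw [PySem.List.pySetD_of_nonneg _ _ h0]; simp
          rw [show (t.length : Int)
              = ((PySem.List.pySetD t (PySem.List.pyGetD (idxE t) (-1) 0) s).length : Int)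
              by rw [hlen2], pySetD_append_self]
          simp [hr]

-- ===== VERDICT (by name: the statement is the Claim_ definition above) =====
theorem replace_last_two_path_tokens_py_spec : Claim_equal_replace_last_two_path_tokens_py := by
  intro parts new_src new_dst _
  unfold Spec_replace_last_two_path_tokens_py replace_last_two_path_tokens_py_alt
  rw [PySem.List.slice?_none_none_neg_one, main_eq]
  cases hrg : rltGo parts.reverse [new_dst, new_src] with
  | none => simp [hrg]
  | some r => simp [hrg, PySem.List.slice?_none_none_neg_one]
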